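-- pv_equiv track=rewrite | github.com/mediwind/PS_Algorithm | 백준/Gold/2801. REZ/REZ.py | find_minimum_x
-- ===== SOURCE A (Python) =====
-- def triangular_number(x):
--     # x에 대한 삼각수를 계산
--     return 1 + x * (x + 1) // 2
--
-- def find_minimum_x(target):
--     # 삼각수 공식에서 triangular_number(x) >= target을 만족하는 최소 x를 탐색
--     low, high = 0, 1500
--     while high - low:
--         mid = (low + high) // 2
--         if triangular_number(mid) >= target:  # 조건을 만족하면 상한값을 줄임
--             high = mid
--         else:  # 조건을 만족하지 않으면 하한값을 늘림
--             low = mid + 1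
--     return low  # 최소 x 반환
-- ===== SOURCE B (Python) =====
-- def find_minimum_x(target):
--     for x in range(1500):
--         if 1 + x * (x + 1) // 2 >= target:
--             return x
--     return 1500
-- ===== Notes on version B (the rewrite author's own statement) =====
-- stated objective: simpler
-- what changed: Replaces the hand-written binary search over [0,1500] with a single linear scan returning the first x in range(1500) satisfying 1 + x*(x+1)//2 >= target, with 1500 as fallback (matching the clamped return).
import Mathlib
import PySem

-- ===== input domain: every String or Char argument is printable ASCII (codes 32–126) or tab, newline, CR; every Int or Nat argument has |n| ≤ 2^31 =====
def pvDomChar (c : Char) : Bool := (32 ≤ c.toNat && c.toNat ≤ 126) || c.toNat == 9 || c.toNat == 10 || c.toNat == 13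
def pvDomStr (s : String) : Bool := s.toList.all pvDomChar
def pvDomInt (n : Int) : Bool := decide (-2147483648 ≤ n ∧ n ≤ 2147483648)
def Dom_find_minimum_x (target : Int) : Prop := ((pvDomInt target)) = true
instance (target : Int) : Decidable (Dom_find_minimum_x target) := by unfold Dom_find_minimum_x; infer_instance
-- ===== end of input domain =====

-- B replaces A's binary search over [0,1500] with a linear scan for the first satisfying x (same values; simpler).


-- ===== PORT A =====
-- 1 + x * (x + 1) // 2
def triangular_number (x : Int) : Int := 1 + PySem.Int.floordiv (x * (x + 1)) 2

-- the 'while high - low:' loop of A, state (low, high); fuel only makes the recursion structural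
-- (1501 > log2 of the initial width 1500, so the 0-fuel branch is never reached from the initial call)
def find_minimum_x_loop (target : Int) : Nat → Int → Int → Int
  | 0, low, _ => low
  | fuel + 1, low, high =>
    if high - low = 0 then low
    else
      let mid := PySem.Int.floordiv (low + high) 2
      if triangular_number mid ≥ target then
        find_minimum_x_loop target fuel low mid
      else
        find_minimum_x_loop target fuel (mid + 1) high

def find_minimum_x (target : Int) : Int := find_minimum_x_loop target 1501 0 1500

-- ===== PORT B =====
-- the 'for x in range(1500)' loop of B, as a countdown over the remaining iterations
-- (x is the current index, fuel the number of indices left, so x + fuel = 1500 throughout)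
def find_minimum_x_alt_loop (target : Int) : Nat → Nat → Int
  | 0, _ => 1500
  | fuel + 1, x =>
    if 1 + PySem.Int.floordiv ((x : Int) * ((x : Int) + 1)) 2 ≥ target then (x : Int)
    else find_minimum_x_alt_loop target fuel (x + 1)

def find_minimum_x_alt (target : Int) : Int := find_minimum_x_alt_loop target 1500 0

-- ===== PRECONDITION & SPEC =====
def Spec_find_minimum_x (target : Int) (out : Int) : Prop := out = find_minimum_x_alt target
instance (target : Int) (out : Int) : Decidable (Spec_find_minimum_x target out) := by unfold Spec_find_minimum_x; infer_instance

-- ===== CLAIM (what is proved, stated in full; the proofs are below) =====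
def Claim_equal_find_minimum_x : Prop := ∀ (target : Int), Dom_find_minimum_x target → Spec_find_minimum_x target (find_minimum_x target)

-- ===== LEMMAS AND PROOFS =====

-- characterisation shared by both loops' results: r is in [0,1500], nothing below r reaches the
-- threshold, and r itself does (unless r is the clamp 1500)
def Char_fmx (target r : Int) : Prop :=
  0 ≤ r ∧ r ≤ 1500 ∧ (∀ y : Int, 0 ≤ y → y < r → ¬ triangular_number y ≥ target) ∧
  (r = 1500 ∨ triangular_number r ≥ target)

theorem tri_mono (y m : Int) (h0 : 0 ≤ y) (h : y ≤ m) :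
    triangular_number y ≤ triangular_number m := by
  unfold triangular_number
  rw [PySem.Int.floordiv_eq_ediv_of_pos (a := y * (y + 1)) (by norm_num),
      PySem.Int.floordiv_eq_ediv_of_pos (a := m * (m + 1)) (by norm_num)]
  have hmul : y * (y + 1) ≤ m * (m + 1) := by nlinarith
  omega

theorem char_unique (target r s : Int) (hr : Char_fmx target r) (hs : Char_fmx target s) : r = s := by
  obtain ⟨hr0, hr1, hrl, hrh⟩ := hr
  obtain ⟨hs0, hs1, hsl, hsh⟩ := hs
  by_contra hne
  rcases lt_or_gt_of_ne hne with h | h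
  · have : triangular_number r ≥ target := by
      rcases hrh with h' | h' <;> [omega; exact h']
    exact hsl r hr0 h this
  · have : triangular_number s ≥ target := by
      rcases hsh with h' | h' <;> [omega; exact h']
    exact hrl s hs0 h this

theorem loopA_char (target : Int) : ∀ fuel : Nat, ∀ low high : Int, high - low < 2 ^ fuel →
    0 ≤ low → low ≤ high → high ≤ 1500 →
    (∀ y : Int, 0 ≤ y → y < low → ¬ triangular_number y ≥ target) →
    (high = 1500 ∨ triangular_number high ≥ target) →
    Char_fmx target (find_minimum_x_loop target fuel low high) := by
  intro fuel
  induction fuel with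
  | zero =>
    intro low high hw h0 hlh hh hl hhp
    have heq : low = high := by simp only [pow_zero] at hw; omega
    rw [find_minimum_x_loop]
    exact ⟨h0, by omega, hl, heq ▸ hhp⟩
  | succ f ih =>
    intro low high hw h0 hlh hh hl hhp
    rw [find_minimum_x_loop]
    by_cases h1 : high - low = 0
    · rw [if_pos h1]
      have heq : low = high := by omega
      exact ⟨h0, by omega, hl, heq ▸ hhp⟩
    · rw [if_neg h1]
      show Char_fmx target
        (if triangular_number (PySem.Int.floordiv (low + high) 2) ≥ target then
          find_minimum_x_loop target f low (PySem.Int.floordiv (low + high) 2)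
        else find_minimum_x_loop target f (PySem.Int.floordiv (low + high) 2 + 1) high)
      have he : PySem.Int.floordiv (low + high) 2 = (low + high) / 2 :=
        PySem.Int.floordiv_eq_ediv_of_pos (by norm_num)
      have hp : (2 : Int) ^ (f + 1) = 2 * 2 ^ f := by ring
      have hmb : low ≤ PySem.Int.floordiv (low + high) 2 ∧
          PySem.Int.floordiv (low + high) 2 < high := by rw [he]; omega
      by_cases hc : triangular_number (PySem.Int.floordiv (low + high) 2) ≥ target
      · rw [if_pos hc]
        exact ih low _ (by rw [he] at hmb ⊢; omega) h0 (by omega) (by omega) hl (Or.inr hc)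
      · rw [if_neg hc]
        refine ih _ high (by rw [he] at hmb ⊢; omega) (by omega) (by omega) hh ?_ hhp
        intro y hy0 hym hyp
        exact hc (le_trans hyp (tri_mono y _ hy0 (by omega)))

theorem loopB_char (target : Int) : ∀ fuel x : Nat, x + fuel = 1500 →
    (∀ y : Int, 0 ≤ y → y < (x : Int) → ¬ triangular_number y ≥ target) →
    Char_fmx target (find_minimum_x_alt_loop target fuel x) := by
  intro fuel
  induction fuel with
  | zero =>
    intro x hx hl
    have hx' : x = 1500 := by omega
    subst hx'
    rw [find_minimum_x_alt_loop]
    exact ⟨by norm_num, le_refl _, by exact_mod_cast hl, Or.inl rfl⟩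
  | succ f ih =>
    intro x hx hl
    rw [find_minimum_x_alt_loop]
    by_cases hp : 1 + PySem.Int.floordiv ((x : Int) * ((x : Int) + 1)) 2 ≥ target
    · rw [if_pos hp]
      refine ⟨by positivity, by exact_mod_cast Nat.le_of_lt (by omega), hl, Or.inr ?_⟩
      simpa [triangular_number] using hp
    · rw [if_neg hp]
      refine ih (x + 1) (by omega) ?_
      intro y hy0 hym hyp
      rcases lt_or_ge y (x : Int) with h' | h'
      · exact hl y hy0 h' hyp
      · have : y = (x : Int) := by push_cast at hym ⊢; omega
        subst this
        exact hp (by simpa [triangular_number] using hyp)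

-- ===== VERDICT (by name: the statement is the Claim_ definition above) =====
theorem find_minimum_x_spec : Claim_equal_find_minimum_x := by
  intro target _
  unfold Spec_find_minimum_x find_minimum_x find_minimum_x_alt
  refine char_unique target _ _
    (loopA_char target 1501 0 1500 ?_ (by norm_num) (by norm_num) (le_refl _)
      (fun y h0 hy _ => by omega) (Or.inl rfl))
    (loopB_char target 1500 0 rfl (fun y h0 hy _ => by omega))
  calc (1500 : Int) - 0 < 2 ^ 11 := by norm_num
    _ ≤ 2 ^ 1501 := pow_le_pow_right₀ (by norm_num) (by norm_num)
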